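-- pv_equiv track=rewrite | github.com/Vijay11-08/All-In-One-Directory | One Pattern/Star Number Patterns/print_patterns.py | number_changing_pyramid
-- ===== SOURCE A (Python) =====
-- def number_changing_pyramid(n: int) -> str:
--     """Floyd-style: 1, then 2 3, then 4 5 6, ..."""
--     cur = 1
--     lines: list[str] = []
--     for i in range(1, n + 1):
--         parts: list[str] = []
--         for _ in range(i):
--             parts.append(str(cur))
--             cur += 1
--         lines.append(" ".join(parts))
--     return "\n".join(lines)
-- ===== SOURCE B (Python) =====
-- def number_changing_pyramid(n: int) -> str:
--     """Single flat pass: emit the numbers 1..total once, choosing each separator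
--     positionally (a newline after each row-ending triangular position, a space
--     otherwise); tokens are flushed into chunks in bounded buffers. No rows are
--     ever materialised and no per-row join happens."""
--     total = n * (n + 1) // 2 if n > 0 else 0
--     if total == 0:
--         return ""
--     chunks = []
--     buf = []
--     row_end, step = 1, 2
--     for k in range(1, total):
--         buf.append(str(k))
--         if k == row_end:
--             buf.append("\n")
--             row_end += step
--             step += 1
--         else:
--             buf.append(" ")
--         if len(buf) >= 8192:
--             chunks.append("".join(buf))
--             buf = []
--     buf.append(str(total))
--     chunks.append("".join(buf))
--     return "".join(chunks)
-- ===== Notes on version B (the rewrite author's own statement) =====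
-- stated objective: alternative
-- what changed: Replaces A's nested per-row loops (a counter threaded across rows, each row joined then rows joined) by a single flat pass over the whole run of consecutive numbers that emits every number once and picks each separator positionally - a newline at a row-ending triangular position, a space otherwise - collecting tokens through a bounded buffer flushed into chunks; no row strings are ever built.
import Mathlib
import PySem

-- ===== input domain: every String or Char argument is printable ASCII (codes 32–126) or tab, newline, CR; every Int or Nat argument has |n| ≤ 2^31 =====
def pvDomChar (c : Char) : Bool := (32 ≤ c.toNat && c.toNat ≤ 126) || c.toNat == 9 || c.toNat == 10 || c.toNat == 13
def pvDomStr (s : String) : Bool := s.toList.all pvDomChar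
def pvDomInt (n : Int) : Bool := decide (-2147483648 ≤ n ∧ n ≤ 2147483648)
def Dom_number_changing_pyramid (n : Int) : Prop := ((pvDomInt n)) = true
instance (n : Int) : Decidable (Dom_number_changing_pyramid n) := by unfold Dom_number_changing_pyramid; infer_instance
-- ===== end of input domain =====

-- B replaces A's nested row loops by ONE flat pass over 1..total that picks each
-- separator positionally (newline at a row-ending position, else a space) ('alternative').

-- ===== PORT A =====
-- literal port: outer loop threads (cur, lines); inner loop appends str(cur) and increments cur
def number_changing_pyramid (n : Int) : String :=
  PySem.Str.join "\n"
    (((PySem.List.pyRange 1 (n + 1)).foldl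
      (fun (st : Int × List String) i =>
        let inner :=
          (PySem.List.pyRange 0 i).foldl
            (fun (p : Int × List String) _ => (p.1 + 1, p.2 ++ [PySem.Int.toStr p.1]))
            (st.1, [])
        (inner.1, st.2 ++ [PySem.Str.join " " inner.2]))
      (1, [])).2)

-- ===== PORT B =====
-- total = n*(n+1)//2 if n > 0 else 0
def pvTotal (n : Int) : Int := if 0 < n then PySem.Int.floordiv (n * (n + 1)) 2 else 0

-- loop body of Source B: append str(k) to buf, then '\n' (advancing row_end and step) or ' ',
-- then flush buf into chunks when it holds at least 8192 tokens
def pvStep (st : List String × List String × Int × Int) (k : Int) :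
    List String × List String × Int × Int :=
  let buf1 := st.2.1 ++ [PySem.Int.toStr k]
  let t :=
    if k = st.2.2.1 then (buf1 ++ ["\n"], st.2.2.1 + st.2.2.2, st.2.2.2 + 1)
    else (buf1 ++ [" "], st.2.2.1, st.2.2.2)
  if 8192 ≤ t.1.length then (st.1 ++ [PySem.Str.join "" t.1], [], t.2.1, t.2.2)
  else (st.1, t.1, t.2.1, t.2.2)

def number_changing_pyramid_alt (n : Int) : String :=
  if pvTotal n = 0 then ""
  else
    match (PySem.List.pyRange 1 (pvTotal n)).foldl pvStep ([], [], 1, 2) with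
    | (chunks, buf, _, _) =>
        PySem.Str.join "" (chunks ++ [PySem.Str.join "" (buf ++ [PySem.Int.toStr (pvTotal n)])])

-- ===== PRECONDITION & SPEC =====
def Spec_number_changing_pyramid (n : Int) (out : String) : Prop := out = number_changing_pyramid_alt n
instance (n : Int) (out : String) : Decidable (Spec_number_changing_pyramid n out) := by unfold Spec_number_changing_pyramid; infer_instance

-- ===== CLAIM (what is proved, stated in full; the proofs are below) =====
def Claim_equal_number_changing_pyramid : Prop := ∀ (n : Int), Dom_number_changing_pyramid n → Spec_number_changing_pyramid n (number_changing_pyramid n)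

-- ===== LEMMAS AND PROOFS =====

-- first number of row m (0-indexed): 1 + the triangular number T m
def pvCur : Nat → Int
  | 0 => 1
  | m + 1 => pvCur m + (m + 1)

theorem pvCur_tri (m : Nat) : 2 * (pvCur m - 1) = (m : Int) * (m + 1) := by
  induction m with
  | zero => simp [pvCur]
  | succ k ih => simp only [pvCur]; push_cast at *; ring_nf at *; linarith

theorem pvCur_strictMono : StrictMono pvCur := by
  apply strictMono_nat_of_lt_succ
  intro m
  simp only [pvCur]
  have : (0 : Int) ≤ m := Int.natCast_nonneg m
  omega

theorem pvCur_pos (m : Nat) : 1 ≤ pvCur m := by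
  induction m with
  | zero => simp [pvCur]
  | succ k ih => simp only [pvCur]; have : (0 : Int) ≤ k := Int.natCast_nonneg k; omega

-- the inner loop of A: appends str(c), str(c+1), … and advances the counter by the list length
theorem pvInnerFold (l : List Int) (c : Int) (xs : List String) :
    l.foldl (fun (p : Int × List String) _ => (p.1 + 1, p.2 ++ [PySem.Int.toStr p.1])) (c, xs)
      = (c + l.length, xs ++ (List.range l.length).map (fun k : Nat => PySem.Int.toStr (c + (k : Int)))) := by
  induction l generalizing c xs with
  | nil => simp
  | cons a t ih =>
      simp only [List.foldl_cons, ih, List.length_cons]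
      refine Prod.ext ?_ ?_
      · simp; ring
      · simp only [List.range_succ_eq_map, List.map_cons, List.map_map,
          List.append_assoc, List.singleton_append]
        congr 1
        congr 1
        · simp
        · apply List.map_congr_left
          intro k _
          simp only [Function.comp_apply]
          congr 1
          push_cast; ring

-- the string of row m (0-indexed), as A builds it
def pvRow (m : Nat) : String :=
  PySem.Str.join " " ((List.range (m + 1)).map (fun k : Nat => PySem.Int.toStr (pvCur m + (k : Int))))

-- A's outer loop: after m rows the counter is pvCur m and the lines are rows 0..m-1
theorem pvOuterA (m : Nat) :
    (PySem.List.pyRange 1 ((m : Int) + 1)).foldl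
      (fun (st : Int × List String) i =>
        let inner :=
          (PySem.List.pyRange 0 i).foldl
            (fun (p : Int × List String) _ => (p.1 + 1, p.2 ++ [PySem.Int.toStr p.1]))
            (st.1, [])
        (inner.1, st.2 ++ [PySem.Str.join " " inner.2]))
      (1, [])
    = (pvCur m, (List.range m).map pvRow) := by
  induction m with
  | zero =>
      rw [PySem.List.pyRange_one_eq_nil (by norm_num)]
      simp [pvCur]
  | succ k ih =>
      have hsplit : PySem.List.pyRange 1 ((↑(k + 1) : Int) + 1)
          = PySem.List.pyRange 1 ((k : Int) + 1) ++ [(k : Int) + 1] := by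
        have : ((↑(k + 1) : Int) + 1) = ((k : Int) + 1) + 1 := by push_cast; ring
        rw [this, PySem.List.pyRange_one_succ_right (by omega)]
      rw [hsplit, List.foldl_append, ih]
      simp only [List.foldl_cons, List.foldl_nil]
      have hlen : (PySem.List.pyRange 0 ((k : Int) + 1)).length = k + 1 := by
        rw [PySem.List.length_pyRange_one]; omega
      rw [pvInnerFold, hlen]
      refine Prod.ext ?_ ?_
      · simp only [pvCur]; push_cast; ring
      · simp only [List.nil_append]
        conv_rhs => rw [List.range_succ, List.map_append, List.map_cons, List.map_nil]
        congr 1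

-- tokens of row m: "num", " ", "num", " ", …, "num" (no trailing separator)
def pvRowToks (m : Nat) : List String :=
  (List.range m).flatMap (fun k : Nat => [PySem.Int.toStr (pvCur m + (k : Int)), " "])
    ++ [PySem.Int.toStr (pvCur m + (m : Int))]

-- tokens of rows 0..m-1, each followed by a newline token
def pvToksNL : Nat → List String
  | 0 => []
  | m + 1 => pvToksNL m ++ pvRowToks m ++ ["\n"]

-- joining with a separator, written flat: sep goes after every part but the last
theorem pvJoinFlat (sep : List Char) :
    ∀ (xs : List (List Char)) (z : List Char),
    PySem.Chars.join sep (xs ++ [z]) = xs.flatMap (fun q => q ++ sep) ++ z := by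
  intro xs
  induction xs with
  | nil => intro z; simp [PySem.Chars.join_singleton]
  | cons a t ih =>
      intro z
      cases t with
      | nil =>
          simp only [List.cons_append, List.nil_append]
          rw [PySem.Chars.join_cons_cons, PySem.Chars.join_singleton]
          simp
      | cons b t' =>
          simp only [List.cons_append] at ih ⊢
          rw [PySem.Chars.join_cons_cons, ih z]
          simp

-- joining the empty separator is concatenation
theorem pvJoinEmpty : ∀ (l : List (List Char)), PySem.Chars.join [] l = l.flatten := by
  intro l
  induction l with
  | nil => simp [PySem.Chars.join_nil]
  | cons a t ih =>
      cases t with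
      | nil => simp [PySem.Chars.join_singleton]
      | cons b t' =>
          rw [PySem.Chars.join_cons_cons, ih]
          simp

-- flattening the character lists of "num, space" token pairs
theorem pvTokFlat (f : Nat → String) (l : List Nat) :
    (List.map String.toList (l.flatMap (fun k : Nat => [f k, " "]))).flatten
      = l.flatMap (fun k : Nat => (f k).toList ++ [' ']) := by
  induction l with
  | nil => simp
  | cons a t ih =>
      simp only [List.flatMap_cons, List.map_append, List.flatten_append, ih,
        List.map_cons, List.map_nil, List.flatten_cons, List.flatten_nil, List.append_nil]
      rfl

-- the characters of row m's token list are the characters of the row string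
theorem pvRowToksChars (m : Nat) :
    (List.map String.toList (pvRowToks m)).flatten = (pvRow m).toList := by
  unfold pvRowToks pvRow
  rw [List.map_append, List.flatten_append, pvTokFlat]
  rw [PySem.Str.toList_join, List.map_map,
    show List.range (m + 1) = List.range m ++ [m] from List.range_succ, List.map_append]
  simp only [List.map_cons, List.map_nil, List.flatten_cons, List.flatten_nil, List.append_nil]
  rw [pvJoinFlat, List.flatMap_map]
  simp only [Function.comp_apply]
  rw [show (" " : String).toList = [' '] from rfl]

-- the characters of rows 0..m-1 with trailing newlines
theorem pvToksNLChars (m : Nat) :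
    (List.map String.toList (pvToksNL m)).flatten
      = (List.range m).flatMap (fun j : Nat => (pvRow j).toList ++ ['\n']) := by
  induction m with
  | zero => simp [pvToksNL]
  | succ k ih =>
      rw [show pvToksNL (k + 1) = pvToksNL k ++ pvRowToks k ++ ["\n"] from rfl]
      rw [List.map_append, List.map_append, List.flatten_append, List.flatten_append, ih,
        pvRowToksChars, List.range_succ, List.flatMap_append]
      simp

-- unbuffered model of B's loop: same tokens, no chunk flushing
def pvStepU (st : List String × Int × Int) (k : Int) : List String × Int × Int :=
  if k = st.2.1 then (st.1 ++ [PySem.Int.toStr k, "\n"], st.2.1 + st.2.2, st.2.2 + 1)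
  else (st.1 ++ [PySem.Int.toStr k, " "], st.2.1, st.2.2)

-- the characters held by a token list
def pvCharsOf (l : List String) : List Char := (l.map String.toList).flatten

theorem pvCharsOf_append (l₁ l₂ : List String) :
    pvCharsOf (l₁ ++ l₂) = pvCharsOf l₁ ++ pvCharsOf l₂ := by
  simp [pvCharsOf]

theorem pvCharsOf_join (chunks b : List String) :
    pvCharsOf (chunks ++ [PySem.Str.join "" b]) = pvCharsOf chunks ++ pvCharsOf b := by
  rw [pvCharsOf_append]
  congr 1
  simp only [pvCharsOf, List.map_cons, List.map_nil, List.flatten_cons, List.flatten_nil,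
    List.append_nil, PySem.Str.toList_join]
  rw [show ("" : String).toList = [] from rfl, pvJoinEmpty]

-- the two possible outcomes of B's loop body
theorem pvStep_hit (chunks buf : List String) (re sp k : Int) (hk : k = re) :
    pvStep (chunks, buf, re, sp) k =
      if 8192 ≤ (buf ++ [PySem.Int.toStr k, "\n"]).length
      then (chunks ++ [PySem.Str.join "" (buf ++ [PySem.Int.toStr k, "\n"])], [], re + sp, sp + 1)
      else (chunks, buf ++ [PySem.Int.toStr k, "\n"], re + sp, sp + 1) := by
  subst hk
  simp [pvStep, List.append_assoc]

theorem pvStep_miss (chunks buf : List String) (re sp k : Int) (hk : ¬ (k = re)) :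
    pvStep (chunks, buf, re, sp) k =
      if 8192 ≤ (buf ++ [PySem.Int.toStr k, " "]).length
      then (chunks ++ [PySem.Str.join "" (buf ++ [PySem.Int.toStr k, " "])], [], re, sp)
      else (chunks, buf ++ [PySem.Int.toStr k, " "], re, sp) := by
  simp [pvStep, hk, List.append_assoc]

-- flushing is invisible at the character level: B's buffered fold tracks the unbuffered one
theorem pvSim (l : List Int) :
    ∀ (chunks buf pieces : List String) (re sp : Int),
    pvCharsOf chunks ++ pvCharsOf buf = pvCharsOf pieces →
    pvCharsOf (l.foldl pvStep (chunks, buf, re, sp)).1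
        ++ pvCharsOf (l.foldl pvStep (chunks, buf, re, sp)).2.1
      = pvCharsOf (l.foldl pvStepU (pieces, re, sp)).1
    ∧ (l.foldl pvStep (chunks, buf, re, sp)).2.2.1 = (l.foldl pvStepU (pieces, re, sp)).2.1
    ∧ (l.foldl pvStep (chunks, buf, re, sp)).2.2.2 = (l.foldl pvStepU (pieces, re, sp)).2.2 := by
  induction l with
  | nil => intro chunks buf pieces re sp h; exact ⟨h, rfl, rfl⟩
  | cons k t ih =>
      intro chunks buf pieces re sp h
      simp only [List.foldl_cons]
      by_cases hk : k = re
      · rw [pvStep_hit chunks buf re sp k hk,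
          show pvStepU (pieces, re, sp) k
              = (pieces ++ [PySem.Int.toStr k, "\n"], re + sp, sp + 1) by simp [pvStepU, hk]]
        by_cases hfl : 8192 ≤ (buf ++ [PySem.Int.toStr k, "\n"]).length
        · rw [if_pos hfl]
          apply ih
          rw [show pvCharsOf ([] : List String) = [] from rfl, List.append_nil, pvCharsOf_join,
            pvCharsOf_append, pvCharsOf_append, ← List.append_assoc, h]
        · rw [if_neg hfl]
          apply ih
          rw [pvCharsOf_append, pvCharsOf_append, ← List.append_assoc, h]
      · rw [pvStep_miss chunks buf re sp k hk,
          show pvStepU (pieces, re, sp) k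
              = (pieces ++ [PySem.Int.toStr k, " "], re, sp) by simp [pvStepU, hk]]
        by_cases hfl : 8192 ≤ (buf ++ [PySem.Int.toStr k, " "]).length
        · rw [if_pos hfl]
          apply ih
          rw [show pvCharsOf ([] : List String) = [] from rfl, List.append_nil, pvCharsOf_join,
            pvCharsOf_append, pvCharsOf_append, ← List.append_assoc, h]
        · rw [if_neg hfl]
          apply ih
          rw [pvCharsOf_append, pvCharsOf_append, ← List.append_assoc, h]

-- the unbuffered loop over a run of numbers strictly below row_end: every separator is a space
theorem pvSpaceRun (re st : Int) (j : Nat) :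
    ∀ (s : Int) (acc : List String), s + (j : Int) ≤ re →
    (PySem.List.pyRange s (s + (j : Int))).foldl pvStepU (acc, re, st)
      = (acc ++ (List.range j).flatMap (fun k : Nat => [PySem.Int.toStr (s + (k : Int)), " "]), re, st) := by
  induction j with
  | zero =>
      intro s acc _
      rw [show s + ((0 : Nat) : Int) = s by simp, PySem.List.pyRange_one_eq_nil (le_refl s)]
      simp
  | succ j ih =>
      intro s acc h1
      have hcons : PySem.List.pyRange s (s + (↑(j + 1) : Int))
          = s :: PySem.List.pyRange (s + 1) (s + (↑(j + 1) : Int)) := by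
        apply PySem.List.pyRange_one_cons
        push_cast; omega
      rw [hcons, List.foldl_cons]
      have hne : ¬ (s = re) := by push_cast at h1; omega
      have hstep : pvStepU (acc, re, st) s = (acc ++ [PySem.Int.toStr s, " "], re, st) := by
        simp [pvStepU, hne]
      rw [hstep]
      have hend : s + (↑(j + 1) : Int) = (s + 1) + (j : Int) := by push_cast; ring
      rw [hend, ih (s + 1) _ (by push_cast at h1 ⊢; omega)]
      refine Prod.ext ?_ rfl
      have hfun : ∀ k : Nat,
          [PySem.Int.toStr (s + (↑(k + 1) : Int)), (" " : String)]
            = [PySem.Int.toStr (s + 1 + (k : Int)), " "] := by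
        intro k
        have hx : s + (↑(k + 1) : Int) = s + 1 + (k : Int) := by push_cast; ring
        rw [hx]
      have hmap : List.flatMap (fun k : Nat => [PySem.Int.toStr (s + (k : Int)), (" " : String)]) (List.range (j + 1))
          = [PySem.Int.toStr s, " "] ++ List.flatMap (fun k : Nat => [PySem.Int.toStr (s + 1 + (k : Int)), " "]) (List.range j) := by
        rw [List.range_succ_eq_map, List.flatMap_cons, List.flatMap_map]
        simp only [Nat.cast_zero, add_zero, Nat.succ_eq_add_one]
        rw [show (fun k : Nat => [PySem.Int.toStr (s + (↑(k + 1) : Int)), (" " : String)])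
            = (fun k : Nat => [PySem.Int.toStr (s + 1 + (k : Int)), " "]) from funext hfun]
      rw [hmap]
      simp

-- the unbuffered loop over one whole row
theorem pvRowFold (st : Int) (m : Nat) (acc : List String) :
    (PySem.List.pyRange (pvCur m) (pvCur (m + 1))).foldl pvStepU (acc, pvCur m + (m : Int), st)
      = (acc ++ pvRowToks m ++ ["\n"], pvCur m + (m : Int) + st, st + 1) := by
  have hsplit : PySem.List.pyRange (pvCur m) (pvCur (m + 1))
      = PySem.List.pyRange (pvCur m) (pvCur m + (m : Int)) ++ [pvCur m + (m : Int)] := by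
    have : pvCur (m + 1) = (pvCur m + (m : Int)) + 1 := by simp only [pvCur]; ring
    rw [this, PySem.List.pyRange_one_succ_right (by have := Int.natCast_nonneg m; omega)]
  rw [hsplit, List.foldl_append,
    pvSpaceRun (pvCur m + (m : Int)) st m (pvCur m) acc (le_refl _)]
  simp only [List.foldl_cons, List.foldl_nil]
  unfold pvStepU
  simp [pvRowToks, List.append_assoc]

-- the unbuffered loop after the first m rows
theorem pvOuterB (m : Nat) :
    (PySem.List.pyRange 1 (pvCur m)).foldl pvStepU ([], 1, 2)
      = (pvToksNL m, pvCur m + (m : Int), (m : Int) + 2) := by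
  induction m with
  | zero =>
      rw [show pvCur 0 = 1 from rfl, PySem.List.pyRange_one_eq_nil (le_refl 1)]
      simp [pvToksNL]
  | succ k ih =>
      have hsplit : PySem.List.pyRange 1 (pvCur (k + 1))
          = PySem.List.pyRange 1 (pvCur k) ++ PySem.List.pyRange (pvCur k) (pvCur (k + 1)) := by
        exact PySem.List.pyRange_one_append 1 (pvCur k) (pvCur (k + 1)) (pvCur_pos k)
          (le_of_lt (pvCur_strictMono (Nat.lt_succ_self k)))
      rw [hsplit, List.foldl_append, ih, pvRowFold ((k : Int) + 2) k (pvToksNL k)]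
      refine Prod.ext ?_ (Prod.ext ?_ ?_)
      · simp [pvToksNL]
      · simp only [pvCur]; push_cast; ring
      · push_cast; ring

-- ===== VERDICT (by name: the statement is the Claim_ definition above) =====
theorem number_changing_pyramid_spec : Claim_equal_number_changing_pyramid := by
  intro n _
  unfold Spec_number_changing_pyramid number_changing_pyramid number_changing_pyramid_alt
  by_cases h : n ≤ 0
  · rw [show pvTotal n = 0 by unfold pvTotal; rw [if_neg (by omega)],
      PySem.List.pyRange_one_eq_nil (by omega : n + 1 ≤ 1)]
    simp only [List.foldl_nil]
    rw [← String.toList_inj, PySem.Str.toList_join]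
    simp [PySem.Chars.join_nil]
  · have hn0 : 0 < n := by omega
    obtain ⟨K, hK⟩ : ∃ K : Nat, n.toNat = K + 1 := ⟨n.toNat - 1, by omega⟩
    have hn : n = ((↑(K + 1) : Int)) := by omega
    have htotal : pvTotal n = pvCur K + (K : Int) := by
      unfold pvTotal
      rw [if_pos hn0, PySem.Int.floordiv_eq_ediv_of_pos (by norm_num)]
      have h2 : n * (n + 1) = 2 * (pvCur K + (K : Int)) := by
        have h3 := pvCur_tri (K + 1)
        simp only [pvCur] at h3
        rw [hn]; push_cast at h3 ⊢; linarith
      rw [h2, Int.mul_ediv_cancel_left _ (by norm_num)]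
    have hne0 : ¬ (pvTotal n = 0) := by
      rw [htotal]; have := pvCur_pos K; have := Int.natCast_nonneg K; omega
    rw [if_neg hne0, htotal]
    -- A's side
    rw [show n + 1 = ((↑(K + 1) : Int)) + 1 by omega, pvOuterA (K + 1)]
    -- B's side: the buffered fold tracks the unbuffered one
    have hsplit : PySem.List.pyRange 1 (pvCur K + (K : Int))
        = PySem.List.pyRange 1 (pvCur K) ++ PySem.List.pyRange (pvCur K) (pvCur K + (K : Int)) :=
      PySem.List.pyRange_one_append 1 (pvCur K) (pvCur K + (K : Int)) (pvCur_pos K)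
        (by have := Int.natCast_nonneg K; omega)
    have hU : (PySem.List.pyRange 1 (pvCur K + (K : Int))).foldl pvStepU ([], 1, 2)
        = (pvToksNL K ++ (List.range K).flatMap
            (fun k : Nat => [PySem.Int.toStr (pvCur K + (k : Int)), " "]),
           pvCur K + (K : Int), (K : Int) + 2) := by
      rw [hsplit, List.foldl_append, pvOuterB K,
        pvSpaceRun (pvCur K + (K : Int)) ((K : Int) + 2) K (pvCur K) (pvToksNL K) (le_refl _)]
    have hsim := pvSim (PySem.List.pyRange 1 (pvCur K + (K : Int))) [] [] [] 1 2 rfl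
    rw [hU] at hsim
    obtain ⟨hchars, -, -⟩ := hsim
    rcases hr : (PySem.List.pyRange 1 (pvCur K + (K : Int))).foldl pvStep ([], [], 1, 2)
      with ⟨chunks, buf, re', sp'⟩
    rw [hr] at hchars
    simp only at hchars ⊢
    -- compare character lists
    rw [← String.toList_inj, PySem.Str.toList_join, PySem.Str.toList_join,
      show ("" : String).toList = [] from rfl, pvJoinEmpty]
    have hrhs : pvCharsOf (chunks ++ [PySem.Str.join "" (buf ++ [PySem.Int.toStr (pvCur K + (K : Int))])])
        = pvCharsOf (pvToksNL K) ++ (pvRow K).toList := by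
      calc pvCharsOf (chunks ++ [PySem.Str.join "" (buf ++ [PySem.Int.toStr (pvCur K + (K : Int))])])
          = pvCharsOf chunks ++ pvCharsOf (buf ++ [PySem.Int.toStr (pvCur K + (K : Int))]) :=
            pvCharsOf_join _ _
        _ = (pvCharsOf chunks ++ pvCharsOf buf) ++ pvCharsOf [PySem.Int.toStr (pvCur K + (K : Int))] := by
            rw [pvCharsOf_append, List.append_assoc]
        _ = pvCharsOf (pvToksNL K ++ (List.range K).flatMap
              (fun k : Nat => [PySem.Int.toStr (pvCur K + (k : Int)), " "]))
            ++ pvCharsOf [PySem.Int.toStr (pvCur K + (K : Int))] := by rw [hchars]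
        _ = pvCharsOf (pvToksNL K) ++ pvCharsOf ((List.range K).flatMap
              (fun k : Nat => [PySem.Int.toStr (pvCur K + (k : Int)), " "])
              ++ [PySem.Int.toStr (pvCur K + (K : Int))]) := by
            rw [pvCharsOf_append, pvCharsOf_append, List.append_assoc]
        _ = pvCharsOf (pvToksNL K) ++ pvCharsOf (pvRowToks K) := rfl
        _ = pvCharsOf (pvToksNL K) ++ (pvRow K).toList := by
            rw [show pvCharsOf (pvRowToks K) = (pvRow K).toList from pvRowToksChars K]
    rw [show (List.map String.toList
          (chunks ++ [PySem.Str.join "" (buf ++ [PySem.Int.toStr (pvCur K + (K : Int))])])).flatten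
        = pvCharsOf (chunks ++ [PySem.Str.join "" (buf ++ [PySem.Int.toStr (pvCur K + (K : Int))])])
        from rfl, hrhs]
    -- A's side, flattened
    rw [show ("\n" : String).toList = ['\n'] from rfl, List.map_map,
      show List.range (K + 1) = List.range K ++ [K] from List.range_succ, List.map_append]
    simp only [List.map_cons, List.map_nil]
    rw [pvJoinFlat, List.flatMap_map,
      show pvCharsOf (pvToksNL K) = (List.map String.toList (pvToksNL K)).flatten from rfl,
      pvToksNLChars K]
    simp only [Function.comp_apply]
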